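-- pv_equiv track=rewrite | github.com/ait-aecid/anomaly-detection-log-datasets | evaluate.py | get_word_dict
-- ===== SOURCE A (Python) =====
-- def get_word_dict(event_params, sequences):
--     # Learn all parameter values that occur in specific positions of event types
--     word_dict = {}
--     for seq_id in sequences:
--         for event_id, pos_d in event_params[seq_id].items():
--             if event_id not in word_dict:
--                 word_dict[event_id] = {}
--             for pos, params in pos_d.items():
--                 if pos not in word_dict[event_id]:
--                     word_dict[event_id][pos] = params
--                 else:
--                     word_dict[event_id][pos].update(params)
--     return word_dict
-- ===== SOURCE B (Python) =====
-- def get_word_dict(event_params, sequences):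
--     # Two-pass: first gather, per (event_id, pos), the list of param sets in
--     # first-seen order (and the event order); then merge each group and place it.
--     order = {}    # event_id -> {} in first-seen order
--     groups = {}   # (event_id, pos) -> [param sets in first-seen order]
--     for seq_id in sequences:
--         for event_id, pos_d in event_params[seq_id].items():
--             order.setdefault(event_id, {})
--             for pos, params in pos_d.items():
--                 groups.setdefault((event_id, pos), []).append(params)
--     word_dict = order
--     for (event_id, pos), group in groups.items():
--         base = group[0]          # alias the first-seen set, as A does
--         for s in group[1:]:
--             base.update(s)
--         word_dict[event_id][pos] = base
--     return word_dict
-- ===== Notes on version B (the rewrite author's own statement) =====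
-- stated objective: alternative
-- what changed: Replaces the interleaved triple loop that grows/updates the nested dict on the fly by a two-pass shape: one gathering pass building a (event_id,pos)->list-of-param-sets index plus the event order, then one merge-and-place pass over that index; it trades the interleaved updates for an index plus a second pass of equal cost.
import Mathlib
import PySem

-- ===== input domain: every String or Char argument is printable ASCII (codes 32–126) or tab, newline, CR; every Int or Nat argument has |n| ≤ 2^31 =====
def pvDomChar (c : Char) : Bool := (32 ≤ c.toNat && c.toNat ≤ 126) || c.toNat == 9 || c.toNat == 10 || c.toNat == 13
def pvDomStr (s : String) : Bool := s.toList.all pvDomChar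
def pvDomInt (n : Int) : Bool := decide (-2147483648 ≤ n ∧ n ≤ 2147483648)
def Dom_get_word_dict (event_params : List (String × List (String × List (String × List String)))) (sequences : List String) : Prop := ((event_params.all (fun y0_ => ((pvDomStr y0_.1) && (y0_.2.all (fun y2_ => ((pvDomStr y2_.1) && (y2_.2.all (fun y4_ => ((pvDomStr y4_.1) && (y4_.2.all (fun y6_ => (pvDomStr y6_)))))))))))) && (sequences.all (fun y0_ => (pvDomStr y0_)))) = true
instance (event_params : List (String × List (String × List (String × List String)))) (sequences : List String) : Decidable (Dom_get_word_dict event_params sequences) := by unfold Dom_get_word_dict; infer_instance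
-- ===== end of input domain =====

-- B replaces A's interleaved triple loop by a two-pass index-then-merge decomposition
-- (gather per-(event,pos) groups and event order, then merge and place each group);
-- same cost, alternative structure. Both Pythons mutate the first-seen param set of each
-- (event,pos) in place identically; the equivalence proved here is about the return value.


-- word_dict : dict event_id -> (dict pos -> set of params)
abbrev pvWD := PySem.Dict String (PySem.Dict String (List String))
-- gathering index : dict (event_id, pos) -> list of param sets in first-seen order
abbrev pvGRP := PySem.Dict (String × String) (List (List String))

-- ===== PORT A =====
-- body of A's innermost loop: 'if pos not in word_dict[event_id]: … else: ….update(params)'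
def aPosStep (e : String) (wd : pvWD) (pp : String × List String) : pvWD :=
  if (wd.getD e PySem.Dict.empty).contains pp.1 then
    wd.modify e PySem.Dict.empty (fun inner => inner.modify pp.1 [] (fun s => PySem.Set.update s pp.2))
  else
    wd.modify e PySem.Dict.empty (fun inner => inner.insert pp.1 pp.2)

-- body of A's event loop: ensure word_dict[event_id] exists, then the pos loop
def aEvStep (wd : pvWD) (ev : String × List (String × List String)) : pvWD :=
  let wd' := if wd.contains ev.1 then wd else wd.insert ev.1 PySem.Dict.empty
  ev.2.foldl (aPosStep ev.1) wd'

def get_word_dict (event_params : List (String × List (String × List (String × List String)))) (sequences : List String) : List (String × List (String × List String)) :=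
  ((sequences.foldl
      (fun wd sid => ((PySem.Dict.mk event_params).getD sid []).foldl aEvStep wd)
      PySem.Dict.empty).items).map (fun q => (q.1, q.2.items))

-- ===== PORT B =====
-- gathering pass, innermost body: groups.setdefault((event_id, pos), []).append(params)
def bGatherPos (e : String) (grp : pvGRP) (pp : String × List String) : pvGRP :=
  grp.modify (e, pp.1) [] (fun g => g ++ [pp.2])

-- gathering pass, event body: order.setdefault(event_id, {}) and the pos loop
def bGatherEv (st : pvWD × pvGRP) (ev : String × List (String × List String)) : pvWD × pvGRP :=
  (st.1.setdefault ev.1 PySem.Dict.empty, ev.2.foldl (bGatherPos ev.1) st.2)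

-- base = group[0]; for s in group[1:]: base.update(s)
def bMerge (g : List (List String)) : List String :=
  (g.drop 1).foldl PySem.Set.update (g.headD [])

-- merge pass body: word_dict[event_id][pos] = merged group
def bPlace (wd : pvWD) (kg : (String × String) × List (List String)) : pvWD :=
  wd.modify kg.1.1 PySem.Dict.empty (fun inner => inner.insert kg.1.2 (bMerge kg.2))

def get_word_dict_alt (event_params : List (String × List (String × List (String × List String)))) (sequences : List String) : List (String × List (String × List String)) :=
  let st := sequences.foldl
      (fun st sid => ((PySem.Dict.mk event_params).getD sid []).foldl bGatherEv st)
      (PySem.Dict.empty, PySem.Dict.empty)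
  ((st.2.items.foldl bPlace st.1).items).map (fun q => (q.1, q.2.items))

-- ===== PRECONDITION & SPEC =====
-- A raises KeyError on event_params[seq_id] when a sequence id is not a key; exactly those inputs are excluded.
def Pre_get_word_dict (event_params : List (String × List (String × List (String × List String)))) (sequences : List String) : Prop :=
  ∀ s ∈ sequences, s ∈ event_params.map Prod.fst
instance (event_params : List (String × List (String × List (String × List String)))) (sequences : List String) : Decidable (Pre_get_word_dict event_params sequences) := by unfold Pre_get_word_dict; infer_instance

def pvWitness_get_word_dict : (List (String × List (String × List (String × List String)))) × List String :=
  ([("s1", [("e1", [("0", ["a", "b"]), ("1", ["c"])])]), ("s2", [("e1", [("0", ["d"])])])], ["s1", "s2", "s1"])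

def Spec_get_word_dict (event_params : List (String × List (String × List (String × List String)))) (sequences : List String) (out : List (String × List (String × List String))) : Prop := out = get_word_dict_alt event_params sequences
instance (event_params : List (String × List (String × List (String × List String)))) (sequences : List String) (out : List (String × List (String × List String))) : Decidable (Spec_get_word_dict event_params sequences out) := by unfold Spec_get_word_dict; infer_instance

-- ===== CLAIM (what is proved, stated in full; the proofs are below) =====
def Claim_equal_get_word_dict : Prop := ∀ (event_params : List (String × List (String × List (String × List String)))) (sequences : List String), Dom_get_word_dict event_params sequences → Pre_get_word_dict event_params sequences → Spec_get_word_dict event_params sequences (get_word_dict event_params sequences)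

-- ===== LEMMAS AND PROOFS =====

-- B's merge pass as a function of (order, index): the invariant shape of A's accumulator
def pvRender (ord : pvWD) (grp : pvGRP) : pvWD := grp.items.foldl bPlace ord

-- invariant of B's gathering state
def pvInv (ord : pvWD) (grp : pvGRP) : Prop :=
  ord.keys.Nodup ∧ grp.keys.Nodup ∧
  (∀ k ∈ grp.keys, k.1 ∈ ord.keys) ∧
  (∀ e, ord.getD e PySem.Dict.empty = PySem.Dict.empty) ∧
  (∀ g ∈ grp.values, g ≠ [])

theorem dict_eq_of_keys_getD {κ ν : Type} [BEq κ] [LawfulBEq κ] (d d' : PySem.Dict κ ν) (d0 : ν)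
    (h1 : d.keys = d'.keys) (hn : d.keys.Nodup) (h2 : ∀ k, d.getD k d0 = d'.getD k d0) : d = d' := by
  apply PySem.Dict.ext
  rw [PySem.Dict.items_eq_map_keys d hn d0, PySem.Dict.items_eq_map_keys d' (h1 ▸ hn) d0, h1]
  exact List.map_congr_left (fun k _ => by rw [h2 k])

theorem getD_foldl_modify_key_filter {κ ν β : Type} [BEq κ] [LawfulBEq κ] [DecidableEq κ]
    (l : List β) (key : β → κ) (d0 : ν) (f : β → ν → ν) (d : PySem.Dict κ ν) (e : κ) :
    (l.foldl (fun d b => d.modify (key b) d0 (f b)) d).getD e d0 =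
    (l.filter (fun b => key b == e)).foldl (fun v b => f b v) (d.getD e d0) := by
  induction l generalizing d with
  | nil => rfl
  | cons b t ih =>
    simp only [List.foldl_cons, List.filter_cons]
    rw [ih, PySem.Dict.getD_modify]
    by_cases h : key b = e
    · simp [h]
    · rw [if_neg (fun hh => h hh.symm)]
      simp [h]

theorem getD_foldl_insert_key_filter {κ ν β : Type} [BEq κ] [LawfulBEq κ] [DecidableEq κ]
    (l : List β) (key : β → κ) (v : β → ν) (d : PySem.Dict κ ν) (d0 : ν) (e : κ) :
    (l.foldl (fun d b => d.insert (key b) (v b)) d).getD e d0 =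
    (l.filter (fun b => key b == e)).foldl (fun _cur b => v b) (d.getD e d0) := by
  induction l generalizing d with
  | nil => rfl
  | cons b t ih =>
    simp only [List.foldl_cons, List.filter_cons]
    rw [ih, PySem.Dict.getD_insert]
    by_cases h : key b = e
    · simp [h]
    · rw [if_neg (fun hh => h hh.symm)]
      simp [h]

-- keys of the rendered dict are exactly ord's keys
theorem keys_pvRender (ord : pvWD) (grp : pvGRP) (hsub : ∀ k ∈ grp.keys, k.1 ∈ ord.keys) :
    (pvRender ord grp).keys = ord.keys := by
  unfold pvRender bPlace
  have h := PySem.Dict.keys_foldl_modify_key grp.items (fun kg => kg.1.1) PySem.Dict.empty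
    (fun _ kg inner => inner.insert kg.1.2 (bMerge kg.2)) ord
  have h2 : PySem.Set.update (PySem.Dict.keys ord) (grp.items.map fun kg => kg.1.1) = ord.keys := by
    rw [PySem.Set.update_eq_append_filter]
    have hnil : (PySem.Set.ofList (grp.items.map (fun kg => kg.1.1))).filter
        (fun y => !(PySem.Set.contains ord.keys y)) = [] := by
      apply List.filter_eq_nil_iff.mpr
      intro a ha
      have ha' : a ∈ grp.items.map (fun kg => kg.1.1) := (PySem.Set.mem_ofList _ _).mp ha
      obtain ⟨kg, hkg, rfl⟩ := List.mem_map.mp ha'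
      have hmem : kg.1 ∈ grp.keys := List.mem_map.mpr ⟨kg, hkg, rfl⟩
      have := hsub _ hmem
      simp [PySem.Set.contains] at *
      exact this
    rw [hnil, List.append_nil]
  exact h.trans h2

theorem getD_pvRender (ord : pvWD) (grp : pvGRP) (e : String) :
    (pvRender ord grp).getD e PySem.Dict.empty =
    (grp.items.filter (fun kg => kg.1.1 == e)).foldl
      (fun inner kg => inner.insert kg.1.2 (bMerge kg.2)) (ord.getD e PySem.Dict.empty) := by
  unfold pvRender bPlace
  exact getD_foldl_modify_key_filter grp.items (fun kg => kg.1.1) PySem.Dict.empty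
    (fun kg inner => inner.insert kg.1.2 (bMerge kg.2)) ord e

-- inner dict of pvRender at e, as a fold of inserts over the entries of grp with first component e
theorem inner_keys (l : List ((String × String) × List (List String))) :
    (l.foldl (fun inner kg => inner.insert kg.1.2 (bMerge kg.2))
      (PySem.Dict.empty : PySem.Dict String (List String))).keys
    = PySem.Set.ofList (l.map (fun kg => kg.1.2)) := by
  have h := PySem.Dict.keys_foldl_insert_key (ν := List String)
    l (fun kg => kg.1.2) (fun _ kg => bMerge kg.2) PySem.Dict.empty
  simpa [PySem.Set.update_empty] using h

theorem mem_inner_keys (grp : pvGRP) (e p : String) :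
    (p ∈ (grp.items.filter (fun kg => kg.1.1 == e)).map (fun kg => kg.1.2)) ↔ (e, p) ∈ grp.keys := by
  simp only [List.mem_map, List.mem_filter, PySem.Dict.keys, beq_iff_eq]
  constructor
  · rintro ⟨kg, ⟨hm, h1⟩, h2⟩
    exact ⟨kg, hm, by rw [Prod.ext_iff]; exact ⟨h1, h2⟩⟩
  · rintro ⟨kg, hm, hk⟩
    exact ⟨kg, ⟨hm, by rw [hk]⟩, by rw [hk]⟩

-- A's membership test on the rendered dict reads grp's key set
theorem contains_render_inner (ord : pvWD) (grp : pvGRP) (e p : String)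
    (hord : ord.getD e PySem.Dict.empty = PySem.Dict.empty) :
    ((pvRender ord grp).getD e PySem.Dict.empty).contains p = grp.contains (e, p) := by
  rw [getD_pvRender, hord]
  rcases Bool.eq_false_or_eq_true (grp.contains (e, p)) with hc | hc <;> rw [hc]
  · apply (PySem.Dict.contains_iff_mem_keys _ _).mpr
    rw [inner_keys]
    exact (PySem.Set.mem_ofList _ _).mpr ((mem_inner_keys grp e p).mpr
      ((PySem.Dict.contains_iff_mem_keys _ _).mp hc))
  · rw [← Bool.not_eq_true]
    intro hcon
    have hp := (PySem.Dict.contains_iff_mem_keys _ _).mp hcon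
    rw [inner_keys] at hp
    have := (mem_inner_keys grp e p).mp ((PySem.Set.mem_ofList _ _).mp hp)
    rw [← PySem.Dict.contains_iff_mem_keys] at this
    rw [this] at hc; cases hc

theorem bMerge_append (g : List (List String)) (params : List String) (hg : g ≠ []) :
    bMerge (g ++ [params]) = PySem.Set.update (bMerge g) params := by
  cases g with
  | nil => cases hg rfl
  | cons a t => simp [bMerge, List.foldl_append]

-- filtering a list with Nodup keys down to one present key gives that one entry
theorem filter_key_singleton {α β : Type} [BEq α] [LawfulBEq α] (l : List (α × β)) (a : α) (b : β)
    (hnd : (l.map Prod.fst).Nodup) (hm : (a, b) ∈ l) :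
    l.filter (fun q => q.1 == a) = [(a, b)] := by
  induction l with
  | nil => cases hm
  | cons x t ih =>
    simp only [List.map_cons, List.nodup_cons] at hnd
    rcases List.mem_cons.mp hm with rfl | hm'
    · have ht : t.filter (fun q => q.1 == a) = [] := by
        apply List.filter_eq_nil_iff.mpr
        intro q hq hbeq
        have hqa : q.1 = (a, b).1 := by simpa using hbeq
        exact hnd.1 (hqa ▸ List.mem_map.mpr ⟨q, hq, rfl⟩)
      simp [ht]
    · have hne : x.1 ≠ a := by
        rintro rfl
        exact hnd.1 (List.mem_map.mpr ⟨(x.1, b), hm', rfl⟩)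
      rw [List.filter_cons_of_neg (by simpa using hne)]
      exact ih hnd.2 hm'

-- the new-key case of A's pos loop body appends one entry to the index
theorem render_modify_new (ord : pvWD) (grp : pvGRP) (e p : String) (params : List String)
    (hc : grp.contains (e, p) = false) :
    (pvRender ord grp).modify e PySem.Dict.empty (fun inner => inner.insert p params)
    = pvRender ord (grp.modify (e, p) [] (fun g => g ++ [params])) := by
  have hitems : (grp.modify (e, p) [] (fun g => g ++ [params])).items
      = grp.items ++ [((e, p), grp.getD (e, p) [] ++ [params])] :=
    PySem.Dict.items_insert_of_not_contains grp _ hc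
  show _ = (grp.modify (e, p) [] (fun g => g ++ [params])).items.foldl bPlace ord
  rw [hitems, List.foldl_append, PySem.Dict.getD_of_not_contains grp _ hc]
  rfl

-- the existing-key case of A's pos loop body extends the entry's group in place
theorem render_modify_existing (ord : pvWD) (grp : pvGRP) (e p : String) (params : List String)
    (hInv : pvInv ord grp) (he : e ∈ ord.keys) (hc : grp.contains (e, p) = true) :
    (pvRender ord grp).modify e PySem.Dict.empty
      (fun inner => inner.modify p [] (fun s => PySem.Set.update s params))
    = pvRender ord (grp.modify (e, p) [] (fun g => g ++ [params])) := by
  obtain ⟨hOrdN, hGrpN, hSub, hOrd0, hVal⟩ := hInv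
  obtain ⟨g, hget⟩ : ∃ v, grp.get? (e, p) = some v := by
    cases hq : grp.get? (e, p) with
    | none =>
      rw [PySem.Dict.get?_eq_none_iff_contains] at hq
      rw [hq] at hc; cases hc
    | some v => exact ⟨v, rfl⟩
  have hg : grp.getD (e, p) [] = g := by rw [PySem.Dict.getD_eq_get?_getD, hget]; rfl
  have hmi : grp.modify (e, p) [] (fun g => g ++ [params]) = grp.insert (e, p) (g ++ [params]) := by
    rw [← hg]
    rfl
  have hmem : ((e, p), g) ∈ grp.items := PySem.Dict.mem_items_of_get?_eq_some grp hget
  have hgne : g ≠ [] := hVal g (List.mem_map.mpr ⟨((e, p), g), hmem, rfl⟩)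
  have hitems : (grp.modify (e, p) [] (fun g => g ++ [params])).items
      = grp.items.map (fun q => if q.1 == (e, p) then ((e, p), g ++ [params]) else q) := by
    rw [hmi]; exact PySem.Dict.items_insert_of_contains grp _ hc
  have hfst : ∀ q : (String × String) × List (List String),
      ((if q.1 == (e, p) then ((e, p), g ++ [params]) else q) : (String × String) × List (List String)).1 = q.1 := by
    intro q; by_cases hq : q.1 = (e, p) <;> simp [hq]
  have hfilter : ∀ k : String,
      ((grp.items.map (fun q => if q.1 == (e, p) then ((e, p), g ++ [params]) else q)).filter
        (fun kg => kg.1.1 == k))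
      = (grp.items.filter (fun kg => kg.1.1 == k)).map
          (fun q => if q.1 == (e, p) then ((e, p), g ++ [params]) else q) := by
    intro k
    rw [List.filter_map]
    congr 1
    apply List.filter_congr
    intro q _
    simp only [Function.comp_apply, hfst q]
  have hkeys' : (grp.modify (e, p) [] (fun g => g ++ [params])).keys = grp.keys := by
    rw [hmi]; exact PySem.Dict.keys_insert_of_contains grp _ hc
  have hce : (pvRender ord grp).contains e = true :=
    (PySem.Dict.contains_iff_mem_keys _ _).mpr (by rw [keys_pvRender ord grp hSub]; exact he)
  apply dict_eq_of_keys_getD _ _ PySem.Dict.empty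
  · rw [keys_pvRender ord _ (fun k hk => hSub k (hkeys' ▸ hk))]
    show ((pvRender ord grp).insert e _).keys = _
    rw [PySem.Dict.keys_insert_of_contains _ _ hce, keys_pvRender ord grp hSub]
  · show ((pvRender ord grp).insert e _).keys.Nodup
    rw [PySem.Dict.keys_insert_of_contains _ _ hce, keys_pvRender ord grp hSub]
    exact hOrdN
  · intro k
    by_cases hk : k = e
    · subst hk
      rw [PySem.Dict.getD_modify_self, getD_pvRender, getD_pvRender, hOrd0, hitems, hfilter k]
      set L := grp.items.filter (fun kg => kg.1.1 == k) with hL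
      have hLfst : ∀ q ∈ L, q.1.1 = k := by
        intro q hq
        simpa using (List.mem_filter.mp hq).2
      have hLnd : (L.map Prod.fst).Nodup := by
        have hs : L.Sublist grp.items := by rw [hL]; exact List.filter_sublist
        exact (hs.map Prod.fst).nodup hGrpN
      have hmemL : ((k, p), g) ∈ L := by
        rw [hL]; exact List.mem_filter.mpr ⟨hmem, by simp⟩
      have hmem2 : p ∈ L.map (fun kg => kg.1.2) := List.mem_map.mpr ⟨((k, p), g), hmemL, rfl⟩
      have hcp : (L.foldl (fun inner kg => inner.insert kg.1.2 (bMerge kg.2))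
          (PySem.Dict.empty : PySem.Dict String (List String))).contains p = true := by
        apply (PySem.Dict.contains_iff_mem_keys _ _).mpr
        rw [inner_keys]
        exact (PySem.Set.mem_ofList _ _).mpr hmem2
      have hfilter2 : ∀ p' : String,
          ((L.map (fun q => if q.1 == (k, p) then ((k, p), g ++ [params]) else q)).filter
            (fun kg => kg.1.2 == p'))
          = (L.filter (fun kg => kg.1.2 == p')).map
              (fun q => if q.1 == (k, p) then ((k, p), g ++ [params]) else q) := by
        intro p'
        rw [List.filter_map]
        congr 1
        apply List.filter_congr
        intro q _
        simp only [Function.comp_apply, show ∀ q : (String × String) × List (List String),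
          ((if q.1 == (k, p) then ((k, p), g ++ [params]) else q)).1.2 = q.1.2 from
            fun q => by rw [hfst q]]
      apply dict_eq_of_keys_getD _ _ ([] : List String)
      · show ((L.foldl (fun inner kg => inner.insert kg.1.2 (bMerge kg.2)) PySem.Dict.empty).insert p _).keys = _
        rw [PySem.Dict.keys_insert_of_contains _ _ hcp, inner_keys, inner_keys, List.map_map]
        congr 1
        apply List.map_congr_left
        intro q _
        simp only [Function.comp_apply, hfst q]
      · show ((L.foldl (fun inner kg => inner.insert kg.1.2 (bMerge kg.2)) PySem.Dict.empty).insert p _).keys.Nodup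
        rw [PySem.Dict.keys_insert_of_contains _ _ hcp, inner_keys]
        exact PySem.Set.nodup_ofList _
      · intro p'
        by_cases hp : p' = p
        · subst hp
          rw [PySem.Dict.getD_modify_self,
              getD_foldl_insert_key_filter L (fun kg => kg.1.2) (fun kg => bMerge kg.2),
              getD_foldl_insert_key_filter
                (L.map (fun q => if q.1 == (k, p') then ((k, p'), g ++ [params]) else q))
                (fun kg => kg.1.2) (fun kg => bMerge kg.2),
              hfilter2 p']
          have hsingle : L.filter (fun kg => kg.1.2 == p') = [((k, p'), g)] := by
            have hcongr : L.filter (fun kg => kg.1.2 == p') = L.filter (fun kg => kg.1 == (k, p')) := by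
              apply List.filter_congr
              intro q hq
              have h1 := hLfst q hq
              by_cases h2 : q.1.2 = p'
              · simp [h2, Prod.ext_iff, h1]
              · simp [h2, Prod.ext_iff]
            rw [hcongr]
            exact filter_key_singleton L (k, p') g hLnd hmemL
          rw [hsingle]
          simp only [List.map_cons, List.map_nil, beq_self_eq_true, List.foldl_cons, List.foldl_nil]
          exact (bMerge_append g params hgne).symm
        · rw [PySem.Dict.getD_modify_of_ne _ _ _ hp,
              getD_foldl_insert_key_filter L (fun kg => kg.1.2) (fun kg => bMerge kg.2),
              getD_foldl_insert_key_filter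
                (L.map (fun q => if q.1 == (k, p) then ((k, p), g ++ [params]) else q))
                (fun kg => kg.1.2) (fun kg => bMerge kg.2),
              hfilter2 p']
          have hid : (L.filter (fun kg => kg.1.2 == p')).map
              (fun q => if q.1 == (k, p) then ((k, p), g ++ [params]) else q)
              = L.filter (fun kg => kg.1.2 == p') := by
            have hq : ∀ q ∈ L.filter (fun kg => kg.1.2 == p'),
                (if q.1 == (k, p) then (((k, p), g ++ [params]) : (String × String) × List (List String)) else q) = q := by
              intro q hq
              have h2 : q.1.2 = p' := by simpa using (List.mem_filter.mp hq).2
              have hne : q.1 ≠ (k, p) := by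
                intro hq1
                rw [hq1] at h2
                exact hp h2.symm
              simp [hne]
            calc (L.filter (fun kg => kg.1.2 == p')).map _
                = (L.filter (fun kg => kg.1.2 == p')).map id := List.map_congr_left hq
              _ = _ := List.map_id _
          rw [hid]
    · rw [PySem.Dict.getD_modify_of_ne _ _ _ hk, getD_pvRender, getD_pvRender, hitems, hfilter k]
      have hid : (grp.items.filter (fun kg => kg.1.1 == k)).map
          (fun q => if q.1 == (e, p) then ((e, p), g ++ [params]) else q)
          = grp.items.filter (fun kg => kg.1.1 == k) := by
        have hq : ∀ q ∈ grp.items.filter (fun kg => kg.1.1 == k),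
            (if q.1 == (e, p) then (((e, p), g ++ [params]) : (String × String) × List (List String)) else q) = q := by
          intro q hq
          have h2 : q.1.1 = k := by simpa using (List.mem_filter.mp hq).2
          have hne : q.1 ≠ (e, p) := by
            intro hq1
            rw [hq1] at h2
            exact hk h2.symm
          simp [hne]
        calc (grp.items.filter (fun kg => kg.1.1 == k)).map _
            = (grp.items.filter (fun kg => kg.1.1 == k)).map id := List.map_congr_left hq
          _ = _ := List.map_id _
      rw [hid]

theorem pos_step (ord : pvWD) (grp : pvGRP) (e : String) (pp : String × List String)
    (hInv : pvInv ord grp) (he : e ∈ ord.keys) :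
    aPosStep e (pvRender ord grp) pp = pvRender ord (bGatherPos e grp pp) ∧
    pvInv ord (bGatherPos e grp pp) := by
  constructor
  · unfold aPosStep bGatherPos
    rw [contains_render_inner ord grp e pp.1 (hInv.2.2.2.1 e)]
    cases hc : grp.contains (e, pp.1) with
    | true =>
      rw [if_pos rfl]
      exact render_modify_existing ord grp e pp.1 pp.2 hInv he hc
    | false =>
      rw [if_neg (by simp)]
      exact render_modify_new ord grp e pp.1 pp.2 hc
  · obtain ⟨hOrdN, hGrpN, hSub, hOrd0, hVal⟩ := hInv
    refine ⟨hOrdN, ?_, ?_, hOrd0, ?_⟩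
    · exact PySem.Dict.nodup_keys_insert grp (e, pp.1) _ hGrpN
    · intro k hk
      have hk' : k ∈ (grp.insert (e, pp.1) (grp.getD (e, pp.1) [] ++ [pp.2])).keys := hk
      rcases (PySem.Dict.mem_keys_insert grp (e, pp.1) k _).mp hk' with rfl | hmem
      · exact he
      · exact hSub k hmem
    · intro g hg
      have hg' : g ∈ (grp.insert (e, pp.1) (grp.getD (e, pp.1) [] ++ [pp.2])).values := hg
      rcases PySem.Dict.mem_values_insert grp (e, pp.1) _ g hg' with rfl | hmem
      · exact List.append_ne_nil_of_right_ne_nil _ (by simp)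
      · exact hVal g hmem

theorem pos_loop (ord : pvWD) (grp : pvGRP) (e : String) (pd : List (String × List String))
    (hInv : pvInv ord grp) (he : e ∈ ord.keys) :
    pd.foldl (aPosStep e) (pvRender ord grp) = pvRender ord (pd.foldl (bGatherPos e) grp) ∧
    pvInv ord (pd.foldl (bGatherPos e) grp) := by
  induction pd generalizing grp with
  | nil => exact ⟨rfl, hInv⟩
  | cons pp t ih =>
    have hstep := pos_step ord grp e pp hInv he
    simp only [List.foldl_cons]
    rw [hstep.1]
    exact ih (bGatherPos e grp pp) hstep.2

-- A's 'word_dict[event_id] = {}' on a fresh event appends the event to the order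
theorem render_insert_fresh (ord : pvWD) (grp : pvGRP) (e : String)
    (hInv : pvInv ord grp) (he : ord.contains e = false) :
    (pvRender ord grp).insert e PySem.Dict.empty = pvRender (ord.insert e PySem.Dict.empty) grp := by
  obtain ⟨hOrdN, hGrpN, hSub, hOrd0, hVal⟩ := hInv
  have hsub' : ∀ k ∈ grp.keys, k.1 ∈ (ord.insert e PySem.Dict.empty).keys := by
    intro k hk
    exact (PySem.Dict.mem_keys_insert ord e k.1 _).mpr (Or.inr (hSub k hk))
  have hrc : (pvRender ord grp).contains e = false := by
    rw [← Bool.not_eq_true]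
    intro hcon
    have := (PySem.Dict.contains_iff_mem_keys _ _).mp hcon
    rw [keys_pvRender ord grp hSub, ← PySem.Dict.contains_iff_mem_keys] at this
    rw [this] at he; cases he
  apply dict_eq_of_keys_getD _ _ PySem.Dict.empty
  · rw [PySem.Dict.keys_insert_of_not_contains _ _ hrc, keys_pvRender ord grp hSub,
        keys_pvRender _ grp hsub', PySem.Dict.keys_insert_of_not_contains _ _ he]
  · rw [PySem.Dict.keys_insert_of_not_contains _ _ hrc, keys_pvRender ord grp hSub]
    have : e ∉ ord.keys := by
      intro hmem
      rw [← PySem.Dict.contains_iff_mem_keys] at hmem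
      rw [hmem] at he; cases he
    exact hOrdN.append (List.nodup_singleton e)
      (fun a ha hb => this ((List.mem_singleton.mp hb) ▸ ha))
  · intro k
    by_cases hk : k = e
    · subst hk
      rw [PySem.Dict.getD_insert_self, getD_pvRender, PySem.Dict.getD_insert_self]
      have hnil : grp.items.filter (fun kg => kg.1.1 == k) = [] := by
        apply List.filter_eq_nil_iff.mpr
        intro q hq hbeq
        have h1 : q.1.1 = k := by simpa using hbeq
        have h2 : q.1 ∈ grp.keys := List.mem_map.mpr ⟨q, hq, rfl⟩
        have h3 := hSub q.1 h2
        rw [h1, ← PySem.Dict.contains_iff_mem_keys] at h3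
        rw [h3] at he; cases he
      rw [hnil]
      rfl
    · rw [PySem.Dict.getD_insert_of_ne _ _ _ hk, getD_pvRender, getD_pvRender,
          PySem.Dict.getD_insert_of_ne _ _ _ hk]

theorem ev_step (ord : pvWD) (grp : pvGRP) (ev : String × List (String × List String))
    (hInv : pvInv ord grp) :
    aEvStep (pvRender ord grp) ev = pvRender (bGatherEv (ord, grp) ev).1 (bGatherEv (ord, grp) ev).2 ∧
    pvInv (bGatherEv (ord, grp) ev).1 (bGatherEv (ord, grp) ev).2 := by
  obtain ⟨hOrdN, hGrpN, hSub, hOrd0, hVal⟩ := hInv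
  show ev.2.foldl (aPosStep ev.1)
      (if (pvRender ord grp).contains ev.1 then pvRender ord grp
       else (pvRender ord grp).insert ev.1 PySem.Dict.empty)
    = pvRender (ord.setdefault ev.1 PySem.Dict.empty) (ev.2.foldl (bGatherPos ev.1) grp) ∧
    pvInv (ord.setdefault ev.1 PySem.Dict.empty) (ev.2.foldl (bGatherPos ev.1) grp)
  have hck : (pvRender ord grp).contains ev.1 = ord.contains ev.1 := by
    rcases Bool.eq_false_or_eq_true (ord.contains ev.1) with hc | hc <;> rw [hc]
    · apply (PySem.Dict.contains_iff_mem_keys _ _).mpr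
      rw [keys_pvRender ord grp hSub]
      exact (PySem.Dict.contains_iff_mem_keys _ _).mp hc
    · rw [← Bool.not_eq_true]
      intro hcon
      have := (PySem.Dict.contains_iff_mem_keys _ _).mp hcon
      rw [keys_pvRender ord grp hSub, ← PySem.Dict.contains_iff_mem_keys] at this
      rw [this] at hc; cases hc
  cases hc : ord.contains ev.1 with
  | true =>
    rw [hck, hc, if_pos rfl, PySem.Dict.setdefault_of_contains ord _ hc]
    exact pos_loop ord grp ev.1 ev.2 ⟨hOrdN, hGrpN, hSub, hOrd0, hVal⟩
      ((PySem.Dict.contains_iff_mem_keys _ _).mp hc)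
  | false =>
    rw [hck, hc, if_neg (by simp), PySem.Dict.setdefault_of_not_contains ord _ hc]
    rw [render_insert_fresh ord grp ev.1 ⟨hOrdN, hGrpN, hSub, hOrd0, hVal⟩ hc]
    have hInv' : pvInv (ord.insert ev.1 PySem.Dict.empty) grp := by
      refine ⟨PySem.Dict.nodup_keys_insert ord ev.1 _ hOrdN, hGrpN, ?_, ?_, hVal⟩
      · intro k hk
        exact (PySem.Dict.mem_keys_insert ord ev.1 k.1 _).mpr (Or.inr (hSub k hk))
      · intro e'
        by_cases he' : e' = ev.1
        · subst he'
          exact PySem.Dict.getD_insert_self ord _ _ _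
        · rw [PySem.Dict.getD_insert_of_ne _ _ _ he']
          exact hOrd0 e'
    exact pos_loop (ord.insert ev.1 PySem.Dict.empty) grp ev.1 ev.2 hInv'
      ((PySem.Dict.mem_keys_insert ord ev.1 ev.1 _).mpr (Or.inl rfl))

theorem ev_loop (ord : pvWD) (grp : pvGRP) (evl : List (String × List (String × List String)))
    (hInv : pvInv ord grp) :
    evl.foldl aEvStep (pvRender ord grp) =
      pvRender (evl.foldl bGatherEv (ord, grp)).1 (evl.foldl bGatherEv (ord, grp)).2 ∧
    pvInv (evl.foldl bGatherEv (ord, grp)).1 (evl.foldl bGatherEv (ord, grp)).2 := by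
  induction evl generalizing ord grp with
  | nil => exact ⟨rfl, hInv⟩
  | cons ev t ih =>
    have hstep := ev_step ord grp ev hInv
    simp only [List.foldl_cons]
    rw [hstep.1]
    exact ih (bGatherEv (ord, grp) ev).1 (bGatherEv (ord, grp) ev).2 hstep.2

theorem seq_loop (ep : List (String × List (String × List (String × List String))))
    (seqs : List String) (ord : pvWD) (grp : pvGRP) (hInv : pvInv ord grp) :
    seqs.foldl (fun wd sid => ((PySem.Dict.mk ep).getD sid []).foldl aEvStep wd) (pvRender ord grp) =
      pvRender (seqs.foldl (fun st sid => ((PySem.Dict.mk ep).getD sid []).foldl bGatherEv st) (ord, grp)).1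
               (seqs.foldl (fun st sid => ((PySem.Dict.mk ep).getD sid []).foldl bGatherEv st) (ord, grp)).2 ∧
    pvInv (seqs.foldl (fun st sid => ((PySem.Dict.mk ep).getD sid []).foldl bGatherEv st) (ord, grp)).1
          (seqs.foldl (fun st sid => ((PySem.Dict.mk ep).getD sid []).foldl bGatherEv st) (ord, grp)).2 := by
  induction seqs generalizing ord grp with
  | nil => exact ⟨rfl, hInv⟩
  | cons sid t ih =>
    have hstep := ev_loop ord grp ((PySem.Dict.mk ep).getD sid []) hInv
    simp only [List.foldl_cons]
    rw [hstep.1]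
    exact ih (((PySem.Dict.mk ep).getD sid []).foldl bGatherEv (ord, grp)).1
             (((PySem.Dict.mk ep).getD sid []).foldl bGatherEv (ord, grp)).2 hstep.2

-- ===== VERDICT (by name: the statement is the Claim_ definition above) =====
theorem get_word_dict_spec : Claim_equal_get_word_dict := by
  intro ep seqs _hDom _hPre
  unfold Spec_get_word_dict get_word_dict get_word_dict_alt
  have h := seq_loop ep seqs PySem.Dict.empty PySem.Dict.empty
    (by refine ⟨List.nodup_nil, List.nodup_nil, ?_, ?_, ?_⟩ <;> simp [PySem.Dict.keys, PySem.Dict.empty, PySem.Dict.values, PySem.Dict.getD, PySem.Dict.get?])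
  have h0 : pvRender PySem.Dict.empty PySem.Dict.empty = PySem.Dict.empty := rfl
  rw [← h0, h.1]
  rfl
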